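-- pv_equiv track=rewrite | github.com/Srini-py/Python | Daily_Coding_Problem/597_pythagorean_triplet.py | is_pythagorean
-- ===== SOURCE A (Python) =====
-- def is_pythagorean(l, n):
--   l = [i**2 for i in l]
--   l.sort()
--   for a in range(n - 1, 1, -1):
--     b = 0
--     c = a - 1
--     while b < c:
--       if l[b] + l[c] == l[a]:
--         return True
--       elif l[b] + l[c] < l[a]:
--         b += 1
--       else:
--         c -= 1
--   return False
-- ===== SOURCE B (Python) =====
-- def is_pythagorean(l, n):
--     sq = sorted(x * x for x in l)
--     for a in range(2, n):
--         seen = set()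
--         target = sq[a]
--         for b in range(a):
--             if target - sq[b] in seen:
--                 return True
--             seen.add(sq[b])
--     return False
-- ===== Notes on version B (the rewrite author's own statement) =====
-- stated objective: alternative
-- what changed: Replaces the converging two-pointer scan per hypotenuse with a forward hash-set two-sum pass (seen-set lookup), iterating hypotenuse indices upward instead of downward.
import Mathlib
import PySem

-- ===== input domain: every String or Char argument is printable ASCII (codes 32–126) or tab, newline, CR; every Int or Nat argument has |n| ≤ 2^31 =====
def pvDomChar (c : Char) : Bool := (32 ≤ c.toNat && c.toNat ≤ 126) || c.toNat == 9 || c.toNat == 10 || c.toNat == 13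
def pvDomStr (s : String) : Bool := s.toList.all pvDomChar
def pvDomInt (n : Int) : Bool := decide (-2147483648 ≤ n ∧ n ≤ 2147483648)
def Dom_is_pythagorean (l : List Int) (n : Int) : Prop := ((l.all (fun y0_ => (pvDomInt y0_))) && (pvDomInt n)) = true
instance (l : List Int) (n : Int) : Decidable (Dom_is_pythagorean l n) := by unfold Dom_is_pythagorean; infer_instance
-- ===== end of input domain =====

-- B replaces A's converging two-pointer scan per hypotenuse by a forward hash-set
-- two-sum pass; alternative algorithm, same asymptotic cost.
-- ===== PORT A =====
-- the 'while b < c' loop of A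
def pvTwoPtr (sq : List Int) (t : Int) (b c : Int) : Bool :=
  if h : b < c then
    if PySem.List.pyGetD sq b 0 + PySem.List.pyGetD sq c 0 = t then true
    else if PySem.List.pyGetD sq b 0 + PySem.List.pyGetD sq c 0 < t then
      pvTwoPtr sq t (b + 1) c
    else
      pvTwoPtr sq t b (c - 1)
  else false
termination_by (c - b).toNat
decreasing_by all_goals omega

def is_pythagorean (l : List Int) (n : Int) : Bool :=
  let sq := PySem.List.sorted (l.map (fun i => i ^ 2)) (fun x => x) false
  (PySem.List.pyRange (n - 1) 1 (-1)).any (fun a =>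
    pvTwoPtr sq (PySem.List.pyGetD sq a 0) 0 (a - 1))

-- ===== PORT B =====
-- the inner 'for b in range(a)' loop of B, carrying the seen-set
def pvSeenScan (sq : List Int) (t : Int) (bs : List Int) (seen : PySem.Set Int) : Bool :=
  match bs with
  | [] => false
  | b :: rest =>
    if (t - PySem.List.pyGetD sq b 0) ∈ seen then true
    else pvSeenScan sq t rest (PySem.Set.add seen (PySem.List.pyGetD sq b 0))

def is_pythagorean_alt (l : List Int) (n : Int) : Bool :=
  let sq := PySem.List.sorted (l.map (fun x => x * x)) (fun x => x) false
  (PySem.List.pyRange 2 n 1).any (fun a =>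
    pvSeenScan sq (PySem.List.pyGetD sq a 0) (PySem.List.pyRange 0 a 1) PySem.Set.empty)

-- ===== PRECONDITION & SPEC =====
-- Pre_ excludes exactly the inputs where A raises IndexError: 3 ≤ n together with n > len(l).
def Pre_is_pythagorean (l : List Int) (n : Int) : Prop := n ≤ (l.length : Int) ∨ n ≤ 2
instance (l : List Int) (n : Int) : Decidable (Pre_is_pythagorean l n) := by
  unfold Pre_is_pythagorean; infer_instance
def pvWitness_is_pythagorean : List Int × Int := ([3, 4, 5], 3)

def Spec_is_pythagorean (l : List Int) (n : Int) (out : Bool) : Prop := out = is_pythagorean_alt l n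
instance (l : List Int) (n : Int) (out : Bool) : Decidable (Spec_is_pythagorean l n out) := by unfold Spec_is_pythagorean; infer_instance

-- ===== CLAIM (what is proved, stated in full; the proofs are below) =====
def Claim_equal_is_pythagorean : Prop := ∀ (l : List Int) (n : Int), Dom_is_pythagorean l n → Pre_is_pythagorean l n → Spec_is_pythagorean l n (is_pythagorean l n)

-- ===== LEMMAS AND PROOFS =====

-- monotonicity by index of a sorted list, in pyGetD form
theorem pvSortedMono (xs : List Int) :
    ∀ i j : Int, 0 ≤ i → i ≤ j →
      j < ((PySem.List.sorted xs (fun x => x) false).length : Int) →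
      PySem.List.pyGetD (PySem.List.sorted xs (fun x => x) false) i 0 ≤
        PySem.List.pyGetD (PySem.List.sorted xs (fun x => x) false) j 0 := by
  intro i j hi hij hj
  rw [PySem.List.pyGetD_eq_getElem _ 0 hi (by omega),
      PySem.List.pyGetD_eq_getElem _ 0 (by omega) hj]
  exact PySem.List.sorted_id_getElem_mono xs (by omega) (by omega)

-- the common existence predicate: two earlier squares summing to sq[a]
def pvPairEx (sq : List Int) (t : Int) (b c : Int) : Prop :=
  ∃ i j : Int, b ≤ i ∧ i < j ∧ j ≤ c ∧
    PySem.List.pyGetD sq i 0 + PySem.List.pyGetD sq j 0 = t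

theorem pvTwoPtr_spec (sq : List Int) (t : Int)
    (hmono : ∀ i j : Int, 0 ≤ i → i ≤ j → j < (sq.length : Int) →
      PySem.List.pyGetD sq i 0 ≤ PySem.List.pyGetD sq j 0) :
    ∀ b c : Int, 0 ≤ b → c < (sq.length : Int) →
      (pvTwoPtr sq t b c = true ↔ pvPairEx sq t b c) := by
  suffices H : ∀ (k : Nat) (b c : Int), (c - b).toNat = k → 0 ≤ b → c < (sq.length : Int) →
      (pvTwoPtr sq t b c = true ↔ pvPairEx sq t b c) by
    intro b c hb hc; exact H _ b c rfl hb hc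
  intro k
  induction k using Nat.strong_induction_on with
  | _ k ih =>
    intro b c hk hb hc
    unfold pvTwoPtr
    by_cases hbc : b < c
    · rw [dif_pos hbc]
      by_cases heq : PySem.List.pyGetD sq b 0 + PySem.List.pyGetD sq c 0 = t
      · rw [if_pos heq]
        exact iff_of_true rfl ⟨b, c, le_refl b, hbc, le_refl c, heq⟩
      · rw [if_neg heq]
        by_cases hlt : PySem.List.pyGetD sq b 0 + PySem.List.pyGetD sq c 0 < t
        · rw [if_pos hlt]
          rw [ih ((c - (b + 1)).toNat) (by omega) (b + 1) c rfl (by omega) hc]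
          constructor
          · rintro ⟨i, j, h1, h2, h3, h4⟩
            exact ⟨i, j, by omega, h2, h3, h4⟩
          · rintro ⟨i, j, h1, h2, h3, h4⟩
            refine ⟨i, j, ?_, h2, h3, h4⟩
            by_contra hib
            have hieq : i = b := by omega
            rw [hieq] at h4
            have hjc : PySem.List.pyGetD sq j 0 ≤ PySem.List.pyGetD sq c 0 :=
              hmono j c (by omega) h3 hc
            omega
        · rw [if_neg hlt]
          rw [ih ((c - 1 - b).toNat) (by omega) b (c - 1) rfl hb (by omega)]
          constructor
          · rintro ⟨i, j, h1, h2, h3, h4⟩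
            exact ⟨i, j, h1, h2, by omega, h4⟩
          · rintro ⟨i, j, h1, h2, h3, h4⟩
            refine ⟨i, j, h1, h2, ?_, h4⟩
            by_contra hjc
            have hjeq : j = c := by omega
            rw [hjeq] at h4
            have hbi : PySem.List.pyGetD sq b 0 ≤ PySem.List.pyGetD sq i 0 :=
              hmono b i hb h1 (by omega)
            omega
    · rw [dif_neg hbc]
      apply iff_of_false (by simp)
      rintro ⟨i, j, h1, h2, h3, _⟩
      omega

theorem pvSeenScan_spec (sq : List Int) (t : Int) (a : Int) :
    ∀ (m : Int) (seen : PySem.Set Int), 0 ≤ m →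
      (∀ v : Int, v ∈ seen ↔ ∃ i : Int, 0 ≤ i ∧ i < m ∧ PySem.List.pyGetD sq i 0 = v) →
      (pvSeenScan sq t (PySem.List.pyRange m a 1) seen = true ↔
        ∃ i j : Int, 0 ≤ i ∧ i < j ∧ m ≤ j ∧ j < a ∧
          PySem.List.pyGetD sq i 0 + PySem.List.pyGetD sq j 0 = t) := by
  intro m seen
  induction h : (a - m).toNat generalizing m seen with
  | zero =>
    intro hm hseen
    rw [PySem.List.pyRange_one_eq_nil (by omega)]
    simp only [pvSeenScan]
    apply iff_of_false (by simp)
    rintro ⟨i, j, _, _, h3, h4, _⟩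
    omega
  | succ k ih =>
    intro hm hseen
    have hma : m < a := by omega
    rw [PySem.List.pyRange_one_cons hma]
    simp only [pvSeenScan]
    by_cases hmem : (t - PySem.List.pyGetD sq m 0) ∈ seen
    · rw [if_pos hmem]
      obtain ⟨i, hi0, him, hiv⟩ := (hseen _).mp hmem
      exact iff_of_true rfl ⟨i, m, hi0, him, le_refl m, hma, by omega⟩
    · rw [if_neg hmem]
      rw [ih (m + 1) _ (by omega) (by omega) ?inv]
      case inv =>
        intro v
        rw [PySem.Set.mem_add, hseen v]
        constructor
        · rintro (⟨i, h1, h2, h3⟩ | hv)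
          · exact ⟨i, h1, by omega, h3⟩
          · exact ⟨m, hm, by omega, hv.symm⟩
        · rintro ⟨i, h1, h2, h3⟩
          by_cases hi : i < m
          · exact Or.inl ⟨i, h1, hi, h3⟩
          · have : i = m := by omega
            subst this; exact Or.inr h3.symm
      constructor
      · rintro ⟨i, j, h1, h2, h3, h4, h5⟩
        exact ⟨i, j, h1, h2, by omega, h4, h5⟩
      · rintro ⟨i, j, h1, h2, h3, h4, h5⟩
        refine ⟨i, j, h1, h2, ?_, h4, h5⟩
        by_contra hj
        have hjm : j = m := by omega
        subst hjm
        exact hmem ((hseen _).mpr ⟨i, h1, h2, by omega⟩)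

-- ===== VERDICT (by name: the statement is the Claim_ definition above) =====
theorem is_pythagorean_spec : Claim_equal_is_pythagorean := by
  intro l n _ hpre
  unfold Spec_is_pythagorean is_pythagorean is_pythagorean_alt
  simp only [pow_two]
  set sq := PySem.List.sorted (l.map fun x => x * x) (fun x => x) false with hsq
  have hlen : (sq.length : Int) = (l.length : Int) := by
    simp [hsq, PySem.List.length_sorted]
  have hmono : ∀ i j : Int, 0 ≤ i → i ≤ j → j < (sq.length : Int) →
      PySem.List.pyGetD sq i 0 ≤ PySem.List.pyGetD sq j 0 := by
    simp only [hsq]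
    exact pvSortedMono (l.map fun x => x * x)
  have hE : ∀ a : Int, 2 ≤ a → a < n → n ≤ (l.length : Int) →
      (pvTwoPtr sq (PySem.List.pyGetD sq a 0) 0 (a - 1) = true ↔
       pvSeenScan sq (PySem.List.pyGetD sq a 0) (PySem.List.pyRange 0 a 1) PySem.Set.empty = true) := by
    intro a ha han hn
    rw [pvTwoPtr_spec sq _ hmono 0 (a - 1) (le_refl 0) (by omega)]
    rw [pvSeenScan_spec sq _ a 0 PySem.Set.empty (le_refl 0) ?inv]
    case inv =>
      intro v
      constructor
      · intro hv; simp [PySem.Set.empty] at hv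
      · rintro ⟨i, h1, h2, _⟩; omega
    constructor
    · rintro ⟨i, j, h1, h2, h3, h4⟩
      exact ⟨i, j, h1, h2, by omega, by omega, h4⟩
    · rintro ⟨i, j, h1, h2, _, h4, h5⟩
      exact ⟨i, j, h1, h2, by omega, h5⟩
  rw [Bool.eq_iff_iff, List.any_eq_true, List.any_eq_true]
  constructor
  · rintro ⟨a, ha, hpa⟩
    rw [PySem.List.mem_pyRange_neg_one] at ha
    have hn : n ≤ (l.length : Int) := by rcases hpre with h | h; exact h; omega
    refine ⟨a, ?_, ?_⟩
    · rw [PySem.List.mem_pyRange_one]; omega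
    · exact (hE a (by omega) (by omega) hn).mp hpa
  · rintro ⟨a, ha, hpa⟩
    rw [PySem.List.mem_pyRange_one] at ha
    have hn : n ≤ (l.length : Int) := by rcases hpre with h | h; exact h; omega
    refine ⟨a, ?_, ?_⟩
    · rw [PySem.List.mem_pyRange_neg_one]; omega
    · exact (hE a (by omega) (by omega) hn).mpr hpa
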